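-- pv_equiv track=rewrite | github.com/travmiller/paper-console | app/main.py | _compare_semver_tags
-- ===== SOURCE A (Python) =====
-- def _compare_prerelease_identifiers(left: str, right: str) -> int:
--     left_is_numeric = left.isdigit()
--     right_is_numeric = right.isdigit()
--
--     if left_is_numeric and right_is_numeric:
--         left_num = int(left)
--         right_num = int(right)
--         return (left_num > right_num) - (left_num < right_num)
--
--     if left_is_numeric != right_is_numeric:
--         return -1 if left_is_numeric else 1
--
--     return (left > right) - (left < right)
--
-- def _compare_semver_tags(
--     left: tuple[int, int, int, tuple[str, ...]],
--     right: tuple[int, int, int, tuple[str, ...]],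
-- ) -> int:
--     left_core = left[:3]
--     right_core = right[:3]
--     if left_core != right_core:
--         return (left_core > right_core) - (left_core < right_core)
--
--     left_prerelease = left[3]
--     right_prerelease = right[3]
--     if not left_prerelease and not right_prerelease:
--         return 0
--     if not left_prerelease:
--         return 1
--     if not right_prerelease:
--         return -1
--
--     for left_part, right_part in zip(left_prerelease, right_prerelease):
--         comparison = _compare_prerelease_identifiers(left_part, right_part)
--         if comparison:
--             return comparison
--
--     return (len(left_prerelease) > len(right_prerelease)) - (
--         len(left_prerelease) < len(right_prerelease)
--     )
-- ===== SOURCE B (Python) =====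
-- def _prerelease_key(pre):
--     # numeric ids tag 0 (compare as ints), others tag 1 (compare as strings)
--     return tuple((0, int(p), "") if p.isdigit() else (1, 0, p) for p in pre)
--
-- def _compare_semver_tags(left, right):
--     kl = (left[0], left[1], left[2], 1 if not left[3] else 0, _prerelease_key(left[3]))
--     kr = (right[0], right[1], right[2], 1 if not right[3] else 0, _prerelease_key(right[3]))
--     return (kl > kr) - (kl < kr)
-- ===== Notes on version B (the rewrite author's own statement) =====
-- stated objective: idiomatic
-- what changed: B replaces A's multi-branch early-return comparison (core tuples, four emptiness branches, a zip loop with per-identifier branching, then a length tiebreak) by mapping each version once to a single sort key (major, minor, patch, empty-flag, tagged prerelease identifiers) and letting one lexicographic tuple comparison decide everything.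
import Mathlib
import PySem

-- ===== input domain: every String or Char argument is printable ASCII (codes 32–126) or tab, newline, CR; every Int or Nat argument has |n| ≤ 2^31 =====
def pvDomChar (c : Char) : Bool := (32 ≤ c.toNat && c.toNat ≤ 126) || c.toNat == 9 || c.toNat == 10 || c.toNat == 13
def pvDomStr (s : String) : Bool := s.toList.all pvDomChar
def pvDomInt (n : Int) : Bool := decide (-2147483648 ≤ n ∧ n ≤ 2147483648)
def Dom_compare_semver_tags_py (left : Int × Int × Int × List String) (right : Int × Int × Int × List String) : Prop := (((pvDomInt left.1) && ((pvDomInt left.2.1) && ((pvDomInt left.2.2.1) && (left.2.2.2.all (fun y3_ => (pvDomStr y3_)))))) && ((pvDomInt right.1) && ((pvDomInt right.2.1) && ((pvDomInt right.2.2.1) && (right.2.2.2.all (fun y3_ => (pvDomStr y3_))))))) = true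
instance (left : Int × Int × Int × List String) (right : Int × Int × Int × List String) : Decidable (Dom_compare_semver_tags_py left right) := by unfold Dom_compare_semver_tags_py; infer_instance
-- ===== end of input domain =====

-- B maps each version to one lexicographic sort key instead of A's branch-by-branch comparison;
-- objective: idiomatic (same cost). Same return value on every input (both Pythons are total).

-- ===== PORT A =====

-- Python's lexicographic '<' on a 3-tuple of ints, written out by hand (exact: int components)
def pvLt3 (a b : Int × Int × Int) : Bool :=
  a.1 < b.1 || (a.1 = b.1 && (a.2.1 < b.2.1 || (a.2.1 = b.2.1 && a.2.2 < b.2.2)))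

-- _compare_prerelease_identifiers; 'int(p)' is (ofStr? p).getD 0 — isdigit guarantees the parse succeeds
def compare_prerelease_identifiers (left right : String) : Int :=
  let left_is_numeric := PySem.Str.strIsdigit left
  let right_is_numeric := PySem.Str.strIsdigit right
  if left_is_numeric && right_is_numeric then
    let left_num := (PySem.Int.ofStr? left).getD 0
    let right_num := (PySem.Int.ofStr? right).getD 0
    (if left_num > right_num then (1:Int) else 0) - (if left_num < right_num then 1 else 0)
  else if left_is_numeric != right_is_numeric then
    (if left_is_numeric then (-1:Int) else 1)
  else
    (if right < left then (1:Int) else 0) - (if left < right then 1 else 0)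

-- the 'for … in zip(…)' loop with its early return
def pvZipLoopA : List (String × String) → Option Int
  | [] => none
  | (l, r) :: ps =>
    let comparison := compare_prerelease_identifiers l r
    if comparison ≠ 0 then some comparison else pvZipLoopA ps

def compare_semver_tags_py (left : Int × Int × Int × List String) (right : Int × Int × Int × List String) : Int :=
  let left_core := (left.1, left.2.1, left.2.2.1)
  let right_core := (right.1, right.2.1, right.2.2.1)
  if left_core ≠ right_core then
    (if pvLt3 right_core left_core then (1:Int) else 0) - (if pvLt3 left_core right_core then 1 else 0)
  else
    let left_prerelease := left.2.2.2
    let right_prerelease := right.2.2.2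
    if left_prerelease.isEmpty && right_prerelease.isEmpty then 0
    else if left_prerelease.isEmpty then 1
    else if right_prerelease.isEmpty then -1
    else
      match pvZipLoopA (left_prerelease.zip right_prerelease) with
      | some comparison => comparison
      | none =>
        (if left_prerelease.length > right_prerelease.length then (1:Int) else 0) -
          (if left_prerelease.length < right_prerelease.length then 1 else 0)

-- ===== PORT B =====

-- _prerelease_key's per-identifier key (0, int(p), "") / (1, 0, p)
def pvIdKey (p : String) : Int × Int × String :=
  if PySem.Str.strIsdigit p then (0, (PySem.Int.ofStr? p).getD 0, "") else (1, 0, p)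

-- Python's tuple comparison on one identifier key, as a three-way sign (exact: same-typed slots)
def pvCmpId (a b : Int × Int × String) : Int :=
  if a.1 < b.1 then -1 else if b.1 < a.1 then 1
  else if a.2.1 < b.2.1 then -1 else if b.2.1 < a.2.1 then 1
  else if a.2.2 < b.2.2 then -1 else if b.2.2 < a.2.2 then 1 else 0

-- Python's tuple comparison on the two key tuples (shorter prefix sorts first)
def pvCmpKeys : List (Int × Int × String) → List (Int × Int × String) → Int
  | [], [] => 0
  | [], _ :: _ => -1
  | _ :: _, [] => 1
  | a :: as, b :: bs => let c := pvCmpId a b; if c ≠ 0 then c else pvCmpKeys as bs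

def compare_semver_tags_py_alt (left : Int × Int × Int × List String) (right : Int × Int × Int × List String) : Int :=
  -- kl > kr / kl < kr on the 5-tuples, unrolled into a lexicographic sign chain (exact: same-typed slots)
  let lFlag : Int := if left.2.2.2.isEmpty then 1 else 0
  let rFlag : Int := if right.2.2.2.isEmpty then 1 else 0
  if left.1 < right.1 then -1 else if right.1 < left.1 then 1
  else if left.2.1 < right.2.1 then -1 else if right.2.1 < left.2.1 then 1
  else if left.2.2.1 < right.2.2.1 then -1 else if right.2.2.1 < left.2.2.1 then 1
  else if lFlag < rFlag then -1 else if rFlag < lFlag then 1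
  else pvCmpKeys (left.2.2.2.map pvIdKey) (right.2.2.2.map pvIdKey)

-- ===== PRECONDITION & SPEC =====
def Spec_compare_semver_tags_py (left : Int × Int × Int × List String) (right : Int × Int × Int × List String) (out : Int) : Prop := out = compare_semver_tags_py_alt left right
instance (left : Int × Int × Int × List String) (right : Int × Int × Int × List String) (out : Int) : Decidable (Spec_compare_semver_tags_py left right out) := by unfold Spec_compare_semver_tags_py; infer_instance

-- ===== CLAIM (what is proved, stated in full; the proofs are below) =====
def Claim_equal_compare_semver_tags_py : Prop := ∀ (left : Int × Int × Int × List String) (right : Int × Int × Int × List String), Dom_compare_semver_tags_py left right → Spec_compare_semver_tags_py left right (compare_semver_tags_py left right)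

-- ===== LEMMAS AND PROOFS =====

-- one identifier: B's tagged-key comparison equals A's branchy comparison
theorem pvCmpId_idKey (l r : String) :
    pvCmpId (pvIdKey l) (pvIdKey r) = compare_prerelease_identifiers l r := by
  unfold pvCmpId pvIdKey compare_prerelease_identifiers
  by_cases hl : PySem.Str.strIsdigit l <;> by_cases hr : PySem.Str.strIsdigit r <;>
    simp only [hl, hr, if_true, if_false, Bool.and_self, Bool.and_false, Bool.false_and,
      Bool.false_eq_true, bne]
  · split_ifs <;> simp_all <;> omega
  · norm_num
  · norm_num
  · rcases lt_trichotomy l r with h | h | h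
    · simp [h, lt_asymm h]
    · subst h; simp
    · simp [h, lt_asymm h]

-- the list part: B's key-list comparison equals A's zip loop plus the length tiebreak
theorem pvCmpKeys_eq (lp rp : List String) :
    pvCmpKeys (lp.map pvIdKey) (rp.map pvIdKey) =
      match pvZipLoopA (lp.zip rp) with
      | some c => c
      | none =>
        (if lp.length > rp.length then (1:Int) else 0) - (if lp.length < rp.length then 1 else 0) := by
  induction lp generalizing rp with
  | nil => cases rp <;> simp [pvCmpKeys, pvZipLoopA]
  | cons a as ih =>
    cases rp with
    | nil => simp [pvCmpKeys, pvZipLoopA]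
    | cons b bs =>
      simp only [List.map, List.zip_cons_cons, pvCmpKeys, pvZipLoopA, pvCmpId_idKey]
      by_cases h : compare_prerelease_identifiers a b = 0
      · simp [h, ih bs]
      · simp [h]

-- equal cores: both sides reduce to the prerelease comparison
theorem pvCoreEq (l1 l2 l3 : Int) (lp rp : List String) :
    compare_semver_tags_py (l1, l2, l3, lp) (l1, l2, l3, rp) =
      compare_semver_tags_py_alt (l1, l2, l3, lp) (l1, l2, l3, rp) := by
  unfold compare_semver_tags_py compare_semver_tags_py_alt pvLt3
  simp only [ne_eq, not_true_eq_false, if_false, lt_self_iff_false]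
  rcases lp with _ | ⟨a, as⟩ <;> rcases rp with _ | ⟨b, bs⟩
  · simp [pvCmpKeys]
  · norm_num [pvCmpKeys]
  · norm_num [pvCmpKeys]
  · simp only [pvCmpKeys_eq, List.isEmpty_cons, Bool.and_self, if_false,
      Bool.false_eq_true, lt_self_iff_false, gt_iff_lt]

-- different cores: both sides return the sign of the core comparison
theorem pvCoreNe (l1 l2 l3 r1 r2 r3 : Int) (lp rp : List String)
    (hc : ¬((l1, l2, l3) = (r1, r2, r3))) :
    compare_semver_tags_py (l1, l2, l3, lp) (r1, r2, r3, rp) =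
      compare_semver_tags_py_alt (l1, l2, l3, lp) (r1, r2, r3, rp) := by
  rcases lt_trichotomy l1 r1 with h1 | h1 | h1
  · simp [compare_semver_tags_py, compare_semver_tags_py_alt, pvLt3, Prod.mk.injEq, h1, h1.ne,
      h1.ne', lt_asymm h1]
  · subst h1
    rcases lt_trichotomy l2 r2 with h2 | h2 | h2
    · simp [compare_semver_tags_py, compare_semver_tags_py_alt, pvLt3, Prod.mk.injEq, h2, h2.ne,
        h2.ne', lt_asymm h2]
    · subst h2
      rcases lt_trichotomy l3 r3 with h3 | h3 | h3
      · simp [compare_semver_tags_py, compare_semver_tags_py_alt, pvLt3, Prod.mk.injEq, h3, h3.ne,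
          lt_asymm h3]
      · exact absurd (by rw [h3]) hc
      · simp [compare_semver_tags_py, compare_semver_tags_py_alt, pvLt3, Prod.mk.injEq, h3,
          h3.ne', lt_asymm h3]
    · simp [compare_semver_tags_py, compare_semver_tags_py_alt, pvLt3, Prod.mk.injEq, h2, h2.ne,
        h2.ne', lt_asymm h2]
  · simp [compare_semver_tags_py, compare_semver_tags_py_alt, pvLt3, Prod.mk.injEq, h1, h1.ne,
      h1.ne', lt_asymm h1]

-- ===== VERDICT (by name: the statement is the Claim_ definition above) =====
theorem compare_semver_tags_py_spec : Claim_equal_compare_semver_tags_py := by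
  intro left right _
  unfold Spec_compare_semver_tags_py
  obtain ⟨l1, l2, l3, lp⟩ := left
  obtain ⟨r1, r2, r3, rp⟩ := right
  by_cases hc : (l1, l2, l3) = (r1, r2, r3)
  · rw [Prod.mk.injEq, Prod.mk.injEq] at hc
    obtain ⟨h1, h2, h3⟩ := hc
    subst h1; subst h2; subst h3
    exact pvCoreEq l1 l2 l3 lp rp
  · exact pvCoreNe l1 l2 l3 r1 r2 r3 lp rp hc
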